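-- pv_equiv track=rewrite | github.com/dk264874293/RAG_service | src/pipeline/adaptive_chunker.py | _code_chunk
-- ===== SOURCE A (Python) =====
-- from typing import List, Dict, Optional
--
-- def _code_chunk(text: str) -> List[str]:
--     """代码分块 - 保持代码结构"""
--     # 按函数、类等代码块分割
--     lines = text.split("\n")
--     chunks = []
--     current_block = []
--     indent_level = 0
--
--     for line in lines:
--         stripped = line.lstrip()
--         if not stripped or stripped.startswith("#"):
--             # 空行或注释，继续添加到当前块
--             current_block.append(line)
--         else:
--             # 计算缩进
--             current_indent = len(line) - len(stripped)
--             if current_indent == 0 and current_block: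
--                 # 新的顶级块，保存之前的块
--                 chunks.append("\n".join(current_block))
--                 current_block = [line]
--             else:
--                 current_block.append(line)
--
--     if current_block:
--         chunks.append("\n".join(current_block))
--
--     return chunks
-- ===== SOURCE B (Python) =====
-- from typing import List
--
-- def _is_boundary(line: str) -> bool:
--     s = line.lstrip()
--     return bool(s) and not s.startswith("#") and len(s) == len(line)
--
-- def _code_chunk(text: str) -> List[str]:
--     """Two-pointer span scan: each chunk is a top-level line plus all following non-boundary lines."""
--     lines = text.split("\n")
--     chunks = []
--     i = 0
--     n = len(lines)
--     while i < n:
--         j = i + 1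
--         while j < n and not _is_boundary(lines[j]):
--             j += 1
--         chunks.append("\n".join(lines[i:j]))
--         i = j
--     return chunks
-- ===== Notes on version B (the rewrite author's own statement) =====
-- stated objective: alternative
-- what changed: Replaces A's stateful accumulator loop (current_block flushed into chunks when a top-level line appears) with a two-pointer span scan: for each remaining position, the inner pointer advances past all following non-boundary lines and the span is joined into one chunk.
import Mathlib
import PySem

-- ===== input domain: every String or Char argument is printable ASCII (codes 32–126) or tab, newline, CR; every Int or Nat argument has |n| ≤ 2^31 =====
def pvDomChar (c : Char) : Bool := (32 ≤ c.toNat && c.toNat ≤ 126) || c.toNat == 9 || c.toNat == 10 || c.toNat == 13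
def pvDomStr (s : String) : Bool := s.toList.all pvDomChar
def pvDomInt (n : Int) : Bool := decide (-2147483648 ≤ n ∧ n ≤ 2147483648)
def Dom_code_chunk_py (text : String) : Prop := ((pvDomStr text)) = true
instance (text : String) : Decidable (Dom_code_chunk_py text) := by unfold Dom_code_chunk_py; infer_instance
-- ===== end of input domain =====

-- B replaces A's stateful accumulator loop by a two-pointer span scan (each chunk = one line
-- plus the following non-boundary lines); objective: alternative decomposition, same cost.

-- ===== PORT A =====
-- one iteration of A's for-loop; state = (chunks, current_block)
def stepA (st : List String × List String) (line : String) : List String × List String :=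
  let stripped := PySem.Str.lstrip line
  if PySem.Str.len stripped == 0 || PySem.Str.startswith stripped "#" then
    (st.1, st.2 ++ [line])
  else
    let currentIndent := PySem.Str.len line - PySem.Str.len stripped
    if currentIndent == 0 && !st.2.isEmpty then
      (st.1 ++ [PySem.Str.join "\n" st.2], [line])
    else
      (st.1, st.2 ++ [line])

def code_chunk_py (text : String) : List String :=
  -- text.split("\n"): sep is the nonempty literal "\n", so split? is always `some`; getD [] is unreachable
  let lines : List String := (PySem.Str.split? text "\n").getD []
  let st := lines.foldl stepA ([], [])
  if !st.2.isEmpty then st.1 ++ [PySem.Str.join "\n" st.2] else st.1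

-- ===== PORT B =====
def isBoundaryB (line : String) : Bool :=
  let s := PySem.Str.lstrip line
  !(PySem.Str.len s == 0) && !(PySem.Str.startswith s "#") && (PySem.Str.len s == PySem.Str.len line)

-- B's outer while-loop as recursion on the remaining suffix; the inner while-loop advancing j
-- is the takeWhile/dropWhile split of the tail at the first boundary line
def blocksB : List String → List String
  | [] => []
  | l :: rest =>
    PySem.Str.join "\n" (l :: rest.takeWhile (fun x => !isBoundaryB x)) ::
      blocksB (rest.dropWhile (fun x => !isBoundaryB x))
termination_by ls => ls.length
decreasing_by
  simpa using Nat.lt_succ_of_le (List.length_dropWhile_le _ rest)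

def code_chunk_py_alt (text : String) : List String :=
  blocksB ((PySem.Str.split? text "\n").getD [])

-- ===== PRECONDITION & SPEC =====
def Spec_code_chunk_py (text : String) (out : List String) : Prop := out = code_chunk_py_alt text
instance (text : String) (out : List String) : Decidable (Spec_code_chunk_py text out) := by unfold Spec_code_chunk_py; infer_instance

-- ===== CLAIM (what is proved, stated in full; the proofs are below) =====
def Claim_equal_code_chunk_py : Prop := ∀ (text : String), Dom_code_chunk_py text → Spec_code_chunk_py text (code_chunk_py text)

-- ===== LEMMAS AND PROOFS =====

-- proof-only helper: A's loop rephrased recursively with the running block made explicit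
def blocksAux (cur : List String) : List String → List String
  | [] => [PySem.Str.join "\n" cur]
  | l :: t =>
    if isBoundaryB l then PySem.Str.join "\n" cur :: blocksAux [l] t
    else blocksAux (cur ++ [l]) t

theorem len_lstrip_le (s : String) :
    PySem.Str.len (PySem.Str.lstrip s) ≤ PySem.Str.len s := by
  simp [pysem, PySem.Str.lstrip, PySem.Chars.lstrip]
  exact_mod_cast List.length_dropWhile_le _ _

-- A's flush condition, on a nonempty running block, is exactly B's boundary predicate
theorem stepA_eq (st : List String × List String) (h : st.2 ≠ []) (line : String) :
    stepA st line =
      (if isBoundaryB line then (st.1 ++ [PySem.Str.join "\n" st.2], [line])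
       else (st.1, st.2 ++ [line])) := by
  have hle := len_lstrip_le line
  have h2 : st.2.isEmpty = false := by simpa [List.isEmpty_iff] using h
  unfold stepA isBoundaryB
  simp only [PySem.Str.len_eq, String.length_toList] at hle ⊢
  simp only [h2, Bool.not_false, Bool.and_true, beq_iff_eq, Bool.or_eq_true,
    Bool.and_eq_true, Bool.not_eq_eq_eq_not, Bool.not_true, Nat.cast_inj]
  split_ifs with hA hB hC hD <;> try rfl
  case _ => exfalso; simp only [Nat.cast_eq_zero] at hA; rcases hA with hA | hA <;> simp_all
  case _ => exfalso; simp_all; omega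
  all_goals { exfalso; simp_all }

-- A's loop from a nonempty running block computes blocksAux
theorem foldl_stepA (ls : List String) (chunks cur : List String) (h : cur ≠ []) :
    (if !(ls.foldl stepA (chunks, cur)).2.isEmpty then
        (ls.foldl stepA (chunks, cur)).1 ++ [PySem.Str.join "\n" (ls.foldl stepA (chunks, cur)).2]
      else (ls.foldl stepA (chunks, cur)).1)
      = chunks ++ blocksAux cur ls := by
  induction ls generalizing chunks cur with
  | nil =>
    have h2 : cur.isEmpty = false := by simpa [List.isEmpty_iff] using h
    simp [blocksAux, h2]
  | cons l t ih =>
    rw [List.foldl_cons, stepA_eq (chunks, cur) h l]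
    by_cases hb : isBoundaryB l = true
    · rw [if_pos hb]
      simp only [blocksAux, hb, if_true]
      rw [ih _ [l] (by simp)]
      simp
    · rw [if_neg hb]
      simp only [blocksAux, hb]
      exact ih _ (cur ++ [l]) (by simp)

-- blocksAux on running block cur is: close cur with the non-boundary span, then B's scan
theorem blocksAux_eq (ls cur : List String) :
    blocksAux cur ls =
      PySem.Str.join "\n" (cur ++ ls.takeWhile (fun x => !isBoundaryB x)) ::
        blocksB (ls.dropWhile (fun x => !isBoundaryB x)) := by
  induction ls generalizing cur with
  | nil => simp [blocksAux, blocksB]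
  | cons l t ih =>
    by_cases hb : isBoundaryB l = true
    · simp [blocksAux, hb, ih, blocksB]
    · simp only [blocksAux, hb, ih, List.takeWhile_cons, List.dropWhile_cons]
      simp [hb]

-- the whole pipeline agrees on an arbitrary list of lines
theorem loops_eq (lines : List String) :
    (if !(lines.foldl stepA ([], [])).2.isEmpty then
        (lines.foldl stepA ([], [])).1 ++ [PySem.Str.join "\n" (lines.foldl stepA ([], [])).2]
      else (lines.foldl stepA ([], [])).1)
      = blocksB lines := by
  cases lines with
  | nil => simp [blocksB]
  | cons l t =>
    have hfirst : stepA ([], []) l = ([], [l]) := by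
      simp [stepA]
    rw [List.foldl_cons, hfirst, foldl_stepA t [] [l] (by simp), blocksAux_eq]
    simp [blocksB]

-- ===== VERDICT (by name: the statement is the Claim_ definition above) =====
theorem code_chunk_py_spec : Claim_equal_code_chunk_py := by
  intro text _
  unfold Spec_code_chunk_py code_chunk_py code_chunk_py_alt
  exact loops_eq _
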